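-- pv_equiv track=rewrite | github.com/Gulzhasm/ai_test_gen | src/qa_summary_generator.py | _group_related_bullets
-- ===== SOURCE A (Python) =====
-- from typing import Dict, List, Tuple, Optional, Set
--
-- def _group_related_bullets(bullets: List[str]) -> List[List[str]]:
--     """Group fragment bullets (ending with ":") with their content bullets."""
--     groups = []
--     i = 0
--
--     while i < len(bullets):
--         bullet = bullets[i].strip()
--
--         # Check if this is a fragment (ends with ":")
--         if bullet.endswith(':'):
--             # Start a new group
--             group = [bullet]
--             i += 1
--
--             # Collect following bullets until we hit another fragment or end
--             while i < len(bullets):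
--                 next_bullet = bullets[i].strip()
--                 # Stop if we hit another fragment
--                 if next_bullet.endswith(':'):
--                     break
--                 # Stop if bullet is too long (likely standalone)
--                 if len(next_bullet.split()) > 15:
--                     break
--                 group.append(next_bullet)
--                 i += 1
--
--             groups.append(group)
--         else:
--             # Standalone bullet
--             groups.append([bullet])
--             i += 1
--
--     return groups
-- ===== SOURCE B (Python) =====
-- def _group_related_bullets(bullets):
--     """Group fragment bullets (ending with ":") with their content bullets."""
--     groups = []
--     in_group = False
--     for raw in bullets:
--         bullet = raw.strip()
--         if bullet.endswith(':'):
--             groups.append([bullet])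
--             in_group = True
--         elif in_group and len(bullet.split()) <= 15:
--             groups[-1].append(bullet)
--         else:
--             groups.append([bullet])
--             in_group = False
--     return groups
-- ===== Notes on version B (the rewrite author's own statement) =====
-- stated objective: simpler
-- what changed: Replaced the two-level indexed while-loop state machine with a single flat pass over the bullets that keeps an in-group boolean and appends either to the last group or as a new group.
import Mathlib
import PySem

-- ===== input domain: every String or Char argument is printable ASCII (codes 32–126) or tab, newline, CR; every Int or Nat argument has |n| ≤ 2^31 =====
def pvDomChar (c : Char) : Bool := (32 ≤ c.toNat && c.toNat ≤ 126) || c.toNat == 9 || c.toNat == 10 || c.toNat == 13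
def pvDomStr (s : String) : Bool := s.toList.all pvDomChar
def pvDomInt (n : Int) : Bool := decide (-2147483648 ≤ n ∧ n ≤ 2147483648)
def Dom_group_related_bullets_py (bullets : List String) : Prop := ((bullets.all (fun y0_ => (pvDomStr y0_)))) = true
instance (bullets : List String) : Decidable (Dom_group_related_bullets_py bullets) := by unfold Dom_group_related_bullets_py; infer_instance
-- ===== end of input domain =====

-- B replaces A's nested indexed while-loops with one flat pass keeping an in-group flag (objective: simpler).


-- ===== PORT A =====
-- inner while-loop of A: collect following bullets until another fragment, a long bullet, or the end
def collectA : List String → List String × List String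
  | [] => ([], [])
  | b :: rest =>
    let s := PySem.Str.strip b
    if PySem.Str.endswith s ":" then ([], b :: rest)
    else if 15 < (PySem.Str.split₀ s).length then ([], b :: rest)
    else ((s :: (collectA rest).1), (collectA rest).2)

theorem collectA_len : ∀ l : List String, (collectA l).2.length ≤ l.length := by
  intro l
  induction l with
  | nil => simp [collectA]
  | cons b rest ih =>
    simp only [collectA]
    split_ifs <;> simp <;> omega

def group_related_bullets_py : List String → List (List String)
  | [] => []
  | b :: rest =>
    let s := PySem.Str.strip b
    if PySem.Str.endswith s ":" then
      (s :: (collectA rest).1) :: group_related_bullets_py (collectA rest).2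
    else
      [s] :: group_related_bullets_py rest
termination_by l => l.length
decreasing_by
  · have := collectA_len rest; simp; omega
  · simp

-- ===== PORT B =====
-- one step of B's single flat loop over the bullets; state = (groups so far, in_group flag)
def stepB (st : List (List String) × Bool) (b : String) : List (List String) × Bool :=
  let s := PySem.Str.strip b
  if PySem.Str.endswith s ":" then (st.1 ++ [[s]], true)
  else if st.2 && decide ((PySem.Str.split₀ s).length ≤ 15) then
    (st.1.dropLast ++ [st.1.getLastD [] ++ [s]], true)
  else (st.1 ++ [[s]], false)

def group_related_bullets_py_alt (bullets : List String) : List (List String) :=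
  (bullets.foldl stepB ([], false)).1

-- ===== PRECONDITION & SPEC =====
def Spec_group_related_bullets_py (bullets : List String) (out : List (List String)) : Prop := out = group_related_bullets_py_alt bullets
instance (bullets : List String) (out : List (List String)) : Decidable (Spec_group_related_bullets_py bullets out) := by unfold Spec_group_related_bullets_py; infer_instance

-- ===== CLAIM (what is proved, stated in full; the proofs are below) =====
def Claim_equal_group_related_bullets_py : Prop := ∀ (bullets : List String), Dom_group_related_bullets_py bullets → Spec_group_related_bullets_py bullets (group_related_bullets_py bullets)

-- ===== LEMMAS AND PROOFS =====

-- joint invariant for B's fold against A's two mutually-recursive loops, by strong induction on length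
theorem fold_inv : ∀ n (l : List String), l.length ≤ n →
    (∀ acc, (l.foldl stepB (acc, false)).1 = acc ++ group_related_bullets_py l) ∧
    (∀ acc g, (l.foldl stepB (acc ++ [g], true)).1
        = acc ++ [g ++ (collectA l).1] ++ group_related_bullets_py (collectA l).2) := by
  intro n
  induction n with
  | zero =>
    intro l hl
    have : l = [] := List.eq_nil_of_length_eq_zero (Nat.le_zero.mp hl)
    subst this
    simp [group_related_bullets_py, collectA]
  | succ n ih =>
    intro l hl
    cases l with
    | nil => simp [group_related_bullets_py, collectA]
    | cons b rest =>
      have hr : rest.length ≤ n := by simp at hl; omega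
      obtain ⟨IH1, IH2⟩ := ih rest hr
      by_cases hf : PySem.Str.endswith (PySem.Str.strip b) ":" = true
      · -- fragment bullet
        have hA : group_related_bullets_py (b :: rest)
            = (PySem.Str.strip b :: (collectA rest).1)
                :: group_related_bullets_py (collectA rest).2 := by
          rw [group_related_bullets_py, if_pos hf]
        have hC : collectA (b :: rest) = ([], b :: rest) := by
          rw [collectA, if_pos hf]
        constructor
        · intro acc
          rw [List.foldl_cons,
            show stepB (acc, false) b = (acc ++ [[PySem.Str.strip b]], true) from by
              simp only [stepB]; rw [if_pos hf],
            IH2 acc [PySem.Str.strip b], hA]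
          simp
        · intro acc g
          rw [List.foldl_cons,
            show stepB (acc ++ [g], true) b
                = ((acc ++ [g]) ++ [[PySem.Str.strip b]], true) from by
              simp only [stepB]; rw [if_pos hf],
            IH2 (acc ++ [g]) [PySem.Str.strip b], hC, hA]
          simp
      · by_cases hlen : (PySem.Str.split₀ (PySem.Str.strip b)).length ≤ 15
        · -- short non-fragment bullet
          have hA : group_related_bullets_py (b :: rest)
              = [PySem.Str.strip b] :: group_related_bullets_py rest := by
            rw [group_related_bullets_py, if_neg hf]
          have hC : collectA (b :: rest)
              = (PySem.Str.strip b :: (collectA rest).1, (collectA rest).2) := by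
            rw [collectA, if_neg hf, if_neg (by omega)]
          constructor
          · intro acc
            rw [List.foldl_cons,
              show stepB (acc, false) b = (acc ++ [[PySem.Str.strip b]], false) from by
                simp only [stepB]; rw [if_neg hf, if_neg (by simp)],
              IH1 (acc ++ [[PySem.Str.strip b]]), hA]
            simp
          · intro acc g
            rw [List.foldl_cons,
              show stepB (acc ++ [g], true) b
                  = (acc ++ [g ++ [PySem.Str.strip b]], true) from by
                simp only [stepB]; rw [if_neg hf, if_pos (by simp [hlen])]; simp,
              IH2 acc (g ++ [PySem.Str.strip b]), hC]
            simp
        · -- long non-fragment bullet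
          have hA : group_related_bullets_py (b :: rest)
              = [PySem.Str.strip b] :: group_related_bullets_py rest := by
            rw [group_related_bullets_py, if_neg hf]
          have hC : collectA (b :: rest) = ([], b :: rest) := by
            rw [collectA, if_neg hf, if_pos (by omega)]
          constructor
          · intro acc
            rw [List.foldl_cons,
              show stepB (acc, false) b = (acc ++ [[PySem.Str.strip b]], false) from by
                simp only [stepB]; rw [if_neg hf, if_neg (by simp)],
              IH1 (acc ++ [[PySem.Str.strip b]]), hA]
            simp
          · intro acc g
            rw [List.foldl_cons,
              show stepB (acc ++ [g], true) b
                  = ((acc ++ [g]) ++ [[PySem.Str.strip b]], false) from by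
                simp only [stepB]; rw [if_neg hf, if_neg (by simp [hlen])],
              IH1 ((acc ++ [g]) ++ [[PySem.Str.strip b]]), hC, hA]
            simp

-- ===== VERDICT (by name: the statement is the Claim_ definition above) =====
theorem group_related_bullets_py_spec : Claim_equal_group_related_bullets_py := by
  intro bullets _
  unfold Spec_group_related_bullets_py group_related_bullets_py_alt
  have := (fold_inv bullets.length bullets le_rfl).1 []
  simp [this]
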